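-- pv_equiv track=rewrite | github.com/typerefinery-ai/brett_blocks | tests/utils/data_form_utils.py | create_dependency_order
-- ===== SOURCE A (Python) =====
-- from typing import Dict, Any, List, Optional, Tuple
--
-- def create_dependency_order(test_objects: List[Dict[str, Any]]) -> List[Dict[str, Any]]:
--     """
--     Order test objects based on their dependencies (references)
--
--     Args:
--         test_objects: List of test object configurations
--
--     Returns:
--         Ordered list of test objects
--     """
--     # Simple ordering: put objects with no references first
--     no_refs = []
--     has_refs = []
--
--     for obj in test_objects:
--         if 'references' in obj and obj['references']:
--             has_refs.append(obj)
--         else: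
--             no_refs.append(obj)
--
--     # Return objects with no references first, then objects with references
--     return no_refs + has_refs
-- ===== SOURCE B (Python) =====
-- def create_dependency_order(test_objects):
--     """
--     Order test objects based on their dependencies (references)
--
--     Stable sort by the boolean key "has non-empty references": objects whose
--     key is False (no 'references' key, or a falsy value) come first in their
--     original order, then those with truthy references in their original order.
--     """
--     return sorted(test_objects, key=lambda obj: bool(obj.get('references')))
-- ===== Notes on version B (the rewrite author's own statement) =====
-- stated objective: idiomatic
-- what changed: Replaced the two-accumulator partition loop with a single stable sort keyed by bool(obj.get('references')), relying on sort stability to keep each group's original order.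
import Mathlib
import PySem

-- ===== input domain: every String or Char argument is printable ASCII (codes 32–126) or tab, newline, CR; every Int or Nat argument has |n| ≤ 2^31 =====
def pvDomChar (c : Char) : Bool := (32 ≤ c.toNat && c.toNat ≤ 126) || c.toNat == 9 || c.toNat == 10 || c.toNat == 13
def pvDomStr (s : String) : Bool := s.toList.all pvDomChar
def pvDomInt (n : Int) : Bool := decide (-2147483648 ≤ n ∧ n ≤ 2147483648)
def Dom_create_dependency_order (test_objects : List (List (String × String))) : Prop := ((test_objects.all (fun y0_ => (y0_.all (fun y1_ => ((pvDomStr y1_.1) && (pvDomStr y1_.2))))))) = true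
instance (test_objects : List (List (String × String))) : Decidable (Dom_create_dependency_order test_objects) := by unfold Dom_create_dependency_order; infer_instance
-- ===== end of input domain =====

-- B replaces A's two-accumulator partition loop with one stable sort keyed by
-- bool(obj.get('references')) (idiomatic one-liner; not claimed faster).

-- ===== PORT A =====
-- 'references' in obj and obj['references']  (truthy string = non-empty)
def create_dependency_order (test_objects : List (List (String × String))) : List (List (String × String)) :=
  let p := test_objects.foldl
    (fun (acc : List (List (String × String)) × List (List (String × String))) obj =>
      if PySem.Dict.contains (PySem.Dict.mk obj) "references" && !((PySem.Dict.get? (PySem.Dict.mk obj) "references").getD "" == "")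
      then (acc.1, acc.2 ++ [obj])
      else (acc.1 ++ [obj], acc.2))
    ([], [])
  p.1 ++ p.2

-- ===== PORT B =====
-- bool(obj.get('references')) : missing key → None → False; "" → False; non-empty → True
def pvRefKey (obj : List (String × String)) : Bool :=
  !((PySem.Dict.get? (PySem.Dict.mk obj) "references").getD "" == "")

-- sorted(test_objects, key=…): bool keys compare as 0/1
def create_dependency_order_alt (test_objects : List (List (String × String))) : List (List (String × String)) :=
  PySem.List.sorted test_objects (fun obj => if pvRefKey obj then (1 : Nat) else 0) false

-- ===== PRECONDITION & SPEC =====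
def Spec_create_dependency_order (test_objects : List (List (String × String))) (out : List (List (String × String))) : Prop := out = create_dependency_order_alt test_objects
instance (test_objects : List (List (String × String))) (out : List (List (String × String))) : Decidable (Spec_create_dependency_order test_objects out) := by unfold Spec_create_dependency_order; infer_instance

-- ===== CLAIM (what is proved, stated in full; the proofs are below) =====
def Claim_equal_create_dependency_order : Prop := ∀ (test_objects : List (List (String × String))), Dom_create_dependency_order test_objects → Spec_create_dependency_order test_objects (create_dependency_order test_objects)

-- ===== LEMMAS AND PROOFS =====

-- A's guard equals B's key: when 'references' is absent, get? is none and getD gives "",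
-- so the truthiness test is false either way.
theorem pv_guard_eq (obj : List (String × String)) :
    (PySem.Dict.contains (PySem.Dict.mk obj) "references" && !((PySem.Dict.get? (PySem.Dict.mk obj) "references").getD "" == "")) = pvRefKey obj := by
  unfold pvRefKey
  rw [PySem.Dict.contains_eq_isSome_get?]
  rcases h : PySem.Dict.get? (PySem.Dict.mk obj) "references" with _ | v <;> simp

-- A's loop: both accumulators only grow, collecting the filtered elements in order.
theorem pvA_foldl (xs : List (List (String × String)))
    (a b : List (List (String × String))) :
    xs.foldl
      (fun (acc : List (List (String × String)) × List (List (String × String))) obj =>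
        if PySem.Dict.contains (PySem.Dict.mk obj) "references" && !((PySem.Dict.get? (PySem.Dict.mk obj) "references").getD "" == "")
        then (acc.1, acc.2 ++ [obj])
        else (acc.1 ++ [obj], acc.2)) (a, b)
    = (a ++ xs.filter (fun o => !pvRefKey o), b ++ xs.filter pvRefKey) := by
  simp only [pv_guard_eq]
  induction xs generalizing a b with
  | nil => simp
  | cons x t ih =>
    simp only [List.foldl_cons]
    cases hx : pvRefKey x <;>
      simp [hx, ih, List.append_assoc]

-- insertBy passes over a prefix it is never inserted before
theorem pv_insertBy_append (before : List (String × String) → List (String × String) → Bool)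
    (x : List (String × String)) (A B : List (List (String × String)))
    (hA : ∀ y ∈ A, before x y = false) :
    PySem.List.insertBy before x (A ++ B) = A ++ PySem.List.insertBy before x B := by
  induction A with
  | nil => simp
  | cons a t ih =>
    have ha : before x a = false := hA a (by simp)
    simp only [List.cons_append, PySem.List.insertBy, ha]
    simp [ih (fun y hy => hA y (by simp [hy]))]

-- B's insertion sort with a 0/1 key maintains the partitioned shape.
theorem pvB_foldl (xs : List (List (String × String)))
    (A B : List (List (String × String)))
    (hA : ∀ y ∈ A, pvRefKey y = false) (hB : ∀ y ∈ B, pvRefKey y = true) :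
    xs.foldl
      (fun acc x => PySem.List.insertBy
        (fun a b => decide ((if pvRefKey a then (1 : Nat) else 0) < (if pvRefKey b then (1 : Nat) else 0))) x acc)
      (A ++ B)
    = (A ++ xs.filter (fun o => !pvRefKey o)) ++ (B ++ xs.filter pvRefKey) := by
  induction xs generalizing A B with
  | nil => simp
  | cons x t ih =>
    simp only [List.foldl_cons]
    cases hx : pvRefKey x
    · -- key 0: goes past A (all key 0), then before the head of B (all key 1)
      have hstep : PySem.List.insertBy
          (fun a b => decide ((if pvRefKey a then (1 : Nat) else 0) < (if pvRefKey b then (1 : Nat) else 0))) x (A ++ B)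
          = (A ++ [x]) ++ B := by
        have := pv_insertBy_append
          (fun a b => decide ((if pvRefKey a then (1 : Nat) else 0) < (if pvRefKey b then (1 : Nat) else 0)))
          x A B (fun y hy => by simp [hx, hA y hy])
        rw [this]
        cases B with
        | nil => simp [PySem.List.insertBy]
        | cons b bt =>
          have hb := hB b (by simp)
          simp [PySem.List.insertBy, hx, hb]
      rw [hstep, ih (A ++ [x]) B
        (fun y hy => by rcases List.mem_append.1 hy with h | h
                        · exact hA y h
                        · simp at h; simp [h, hx]) hB]
      simp [hx, List.append_assoc]
    · -- key 1: never before anything (all keys ≤ 1), appended at the end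
      have hstep : PySem.List.insertBy
          (fun a b => decide ((if pvRefKey a then (1 : Nat) else 0) < (if pvRefKey b then (1 : Nat) else 0))) x (A ++ B)
          = A ++ (B ++ [x]) := by
        have := pv_insertBy_append
          (fun a b => decide ((if pvRefKey a then (1 : Nat) else 0) < (if pvRefKey b then (1 : Nat) else 0)))
          x A B (fun y hy => by cases hk : pvRefKey y <;> simp [hx, hk])
        rw [this]
        have : PySem.List.insertBy
            (fun a b => decide ((if pvRefKey a then (1 : Nat) else 0) < (if pvRefKey b then (1 : Nat) else 0))) x B
            = B ++ [x] := by
          have := pv_insertBy_append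
            (fun a b => decide ((if pvRefKey a then (1 : Nat) else 0) < (if pvRefKey b then (1 : Nat) else 0)))
            x B [] (fun y hy => by cases hk : pvRefKey y <;> simp [hx, hk])
          simpa [PySem.List.insertBy] using this
        rw [this]
      rw [hstep, ih A (B ++ [x]) hA
        (fun y hy => by rcases List.mem_append.1 hy with h | h
                        · exact hB y h
                        · simp at h; simp [h, hx])]
      simp [hx, List.append_assoc]

-- ===== VERDICT (by name: the statement is the Claim_ definition above) =====
theorem create_dependency_order_spec : Claim_equal_create_dependency_order := by
  intro xs _
  unfold Spec_create_dependency_order create_dependency_order create_dependency_order_alt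
  rw [pvA_foldl xs [] []]
  show _ = PySem.List.sorted xs (fun obj => if pvRefKey obj then (1 : Nat) else 0) false
  unfold PySem.List.sorted
  simpa using (pvB_foldl xs [] [] (by simp) (by simp)).symm
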